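-- pv_equiv track=rewrite | github.com/emiacetale/Python_Script- | an_CASP.py | clean_result
-- ===== SOURCE A (Python) =====
-- def clean_result(container):              #container=[{G1:{quantity1:value1},{G2:{...},...}}_struct1,{}_struct2,...]
--     #print array[0]
--     data=set(container[0].keys())         #we look for the groups that are in every structure
--     for el in container[1:]:              #   using set and intersection between sets
--         data=(data & set(el.keys()))      #
--     new_container=[]
--     for el in container:
--         new_container.append({key:el[key] for key in data})  #We keep only the groups that predicted all the structures we passed
--     return new_container
-- ===== SOURCE B (Python) =====
-- def clean_result(container):
--     # One pass over all dicts counting key occurrences; a key is common to all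
--     # structures iff its count equals len(container).
--     n = len(container)
--     counts = {}
--     for el in container:
--         for k in el:
--             counts[k] = counts.get(k, 0) + 1
--     common = [k for k, c in counts.items() if c == n]
--     return [{k: el[k] for k in common} for el in container]
-- ===== Notes on version B (the rewrite author's own statement) =====
-- stated objective: alternative
-- what changed: Replaces the iterated set-intersection over container[1:] by a single counting pass (a dict of key occurrence counts; common keys are those with count == len(container)); Pre_ excludes the empty container, on which A raises IndexError while B returns [], and (Lean side only) association lists with duplicate keys, which do not represent Python dicts.
-- outside the precondition, e.g. on clean_result([]): A raises IndexError, B returns []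
import Mathlib
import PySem

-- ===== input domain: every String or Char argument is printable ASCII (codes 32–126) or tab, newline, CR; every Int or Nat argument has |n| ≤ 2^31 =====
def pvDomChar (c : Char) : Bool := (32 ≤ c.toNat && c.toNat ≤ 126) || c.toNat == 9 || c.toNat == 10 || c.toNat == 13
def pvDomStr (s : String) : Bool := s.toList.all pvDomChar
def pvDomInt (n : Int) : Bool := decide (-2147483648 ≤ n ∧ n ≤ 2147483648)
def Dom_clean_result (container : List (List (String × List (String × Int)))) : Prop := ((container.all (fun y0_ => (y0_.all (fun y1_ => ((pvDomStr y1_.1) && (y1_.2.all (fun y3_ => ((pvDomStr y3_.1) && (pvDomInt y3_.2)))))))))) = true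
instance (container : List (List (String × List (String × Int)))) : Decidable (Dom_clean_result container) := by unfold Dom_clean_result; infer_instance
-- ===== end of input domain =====

-- B replaces A's iterated set intersection by a single key-counting pass (count = len(container) ⇔ common); same cost, different algorithm. Equivalence is about the return value.


-- el[key]: Python dict lookup = first match in the association list; every key looked up
-- below is present in el, so the KeyError case (find? = none) is unreachable.
def pvLookup (el : List (String × List (String × Int))) (k : String) : List (String × Int) :=
  ((el.find? (fun p => p.1 == k)).map Prod.snd).getD []

-- ===== PORT A =====
def clean_result (container : List (List (String × List (String × Int)))) : List (List (String × List (String × Int))) :=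
  match container with
  | [] => []  -- Python: container[0] raises IndexError here; excluded by Pre_
  | c0 :: rest =>
    -- data = set(container[0].keys()); for el in container[1:]: data = data & set(el.keys())
    let data : PySem.Set String :=
      rest.foldl (fun d el => PySem.Set.inter d (PySem.Set.ofList (el.map Prod.fst)))
        (PySem.Set.ofList (c0.map Prod.fst))
    -- new_container: for el in container: {key: el[key] for key in data}
    (c0 :: rest).map (fun el => data.map (fun k => (k, pvLookup el k)))

-- ===== PORT B =====
def clean_result_alt (container : List (List (String × List (String × Int)))) : List (List (String × List (String × Int))) :=
  let n : Int := container.length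
  -- counts = {}; for el in container: for k in el: counts[k] = counts.get(k, 0) + 1
  let counts : PySem.Dict String Int :=
    container.foldl (fun d el => el.foldl (fun d kv => d.insert kv.1 (d.getD kv.1 0 + 1)) d)
      PySem.Dict.empty
  -- common = [k for k, c in counts.items() if c == n]
  let common : List String := (counts.items.filter (fun p => p.2 == n)).map Prod.fst
  -- [{k: el[k] for k in common} for el in container]
  container.map (fun el => common.map (fun k => (k, pvLookup el k)))

-- ===== PRECONDITION & SPEC =====
-- Pre_ excludes the empty container, on which A raises IndexError (container[0]) while B returns [], and
-- association lists with duplicate keys, which do not represent Python dicts (the input type).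
def Pre_clean_result (container : List (List (String × List (String × Int)))) : Prop :=
  container ≠ [] ∧ ∀ el ∈ container, (el.map Prod.fst).Nodup
instance (container : List (List (String × List (String × Int)))) : Decidable (Pre_clean_result container) := by unfold Pre_clean_result; infer_instance
def pvWitness_clean_result : (List (List (String × List (String × Int)))) :=
  [[("G1", [("q", 1)]), ("G2", [("q", 2)])], [("G1", [("q", 3)])]]

def Spec_clean_result (container : List (List (String × List (String × Int)))) (out : List (List (String × List (String × Int)))) : Prop := out = clean_result_alt container
instance (container : List (List (String × List (String × Int)))) (out : List (List (String × List (String × Int)))) : Decidable (Spec_clean_result container out) := by unfold Spec_clean_result; infer_instance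

-- ===== CLAIM (what is proved, stated in full; the proofs are below) =====
def Claim_equal_clean_result : Prop := ∀ (container : List (List (String × List (String × Int)))), Dom_clean_result container → Pre_clean_result container → Spec_clean_result container (clean_result container)

-- ===== LEMMAS AND PROOFS =====

-- A's loop: the iterated intersection filters the initial set by membership in every later key list.
theorem pv_foldl_inter (rest : List (List (String × List (String × Int)))) (s : PySem.Set String) :
    rest.foldl (fun d el => PySem.Set.inter d (PySem.Set.ofList (el.map Prod.fst))) s
      = s.filter (fun k => decide (∀ el ∈ rest, k ∈ el.map Prod.fst)) := by
  induction rest generalizing s with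
  | nil => simp
  | cons e rest ih =>
    simp only [List.foldl_cons]
    rw [show PySem.Set.inter s (PySem.Set.ofList (e.map Prod.fst))
        = s.filter (fun k => (PySem.Set.ofList (e.map Prod.fst)).contains k) from rfl, ih,
      List.filter_filter]
    apply List.filter_congr
    intro k _
    rw [Bool.eq_iff_iff]
    simp only [Bool.and_eq_true, decide_eq_true_eq, PySem.Set.contains_iff, PySem.Set.mem_ofList,
      List.forall_mem_cons]
    tauto

-- Folding Set.add appends only unseen elements.
theorem pv_foldl_add_split (xs : List String) : ∀ (s : PySem.Set String),
    ∃ u, xs.foldl PySem.Set.add s = s ++ u ∧ ∀ y ∈ u, y ∉ s := by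
  induction xs with
  | nil => intro s; exact ⟨[], by simp⟩
  | cons x xs ih =>
    intro s
    simp only [List.foldl_cons]
    by_cases hx : PySem.Set.contains s x = true
    · rw [show PySem.Set.add s x = s from by simp [PySem.Set.add, (PySem.Set.contains_iff s x).mp hx]]
      exact ih s
    · have hxs : x ∉ s := fun hm => hx ((PySem.Set.contains_iff s x).mpr hm)
      rw [show PySem.Set.add s x = s ++ [x] from by simp [PySem.Set.add, hxs]]
      obtain ⟨u, hu, hmem⟩ := ih (s ++ [x])
      refine ⟨x :: u, by simpa using hu, ?_⟩
      intro y hy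
      rcases List.mem_cons.mp hy with rfl | hy
      · intro hys
        exact hx ((PySem.Set.contains_iff s y).mpr hys)
      · intro hys; exact hmem y hy (by simp [hys])

-- With per-dict nodup keys, a key occurs at most once per dict in the concatenated key list.
theorem pv_count_le (y : String) (rest : List (List (String × List (String × Int))))
    (h : ∀ el ∈ rest, (el.map Prod.fst).Nodup) :
    (rest.flatMap (fun el => el.map Prod.fst)).count y ≤ rest.length := by
  induction rest with
  | nil => simp
  | cons e rest ih =>
    simp only [List.flatMap_cons, List.count_append, List.length_cons]
    have h1 : (e.map Prod.fst).count y ≤ 1 := (List.nodup_iff_count_le_one.mp (h e (by simp))) y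
    have h2 := ih (fun el hel => h el (by simp [hel]))
    omega

-- ... and the total count reaches rest.length exactly when the key is in every dict.
theorem pv_count_eq_iff (y : String) (rest : List (List (String × List (String × Int))))
    (h : ∀ el ∈ rest, (el.map Prod.fst).Nodup) :
    (rest.flatMap (fun el => el.map Prod.fst)).count y = rest.length
      ↔ ∀ el ∈ rest, y ∈ el.map Prod.fst := by
  induction rest with
  | nil => simp
  | cons e rest ih =>
    simp only [List.flatMap_cons, List.count_append, List.length_cons, List.forall_mem_cons]
    have h1 : (e.map Prod.fst).count y ≤ 1 := (List.nodup_iff_count_le_one.mp (h e (by simp))) y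
    have h2 := pv_count_le y rest (fun el hel => h el (by simp [hel]))
    have h3 := ih (fun el hel => h el (by simp [hel]))
    constructor
    · intro he
      have hce : (e.map Prod.fst).count y = 1 := by omega
      have hcr : (rest.flatMap (fun el => el.map Prod.fst)).count y = rest.length := by omega
      exact ⟨by rw [← List.count_pos_iff]; omega, h3.mp hcr⟩
    · rintro ⟨hy, hall⟩
      have hce : 0 < (e.map Prod.fst).count y := List.count_pos_iff.mpr hy
      have := h3.mpr hall
      omega

-- ===== VERDICT (by name: the statement is the Claim_ definition above) =====
theorem clean_result_spec : Claim_equal_clean_result := by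
  intro container _hdom hpre
  obtain ⟨hne, hnd⟩ := hpre
  obtain ⟨c0, rest, rfl⟩ : ∃ c0 rest, container = c0 :: rest := by
    cases container with
    | nil => exact absurd rfl hne
    | cons a l => exact ⟨a, l, rfl⟩
  unfold Spec_clean_result clean_result clean_result_alt
  simp only
  -- B's counts is Counter of the concatenated key list K
  have hcounts : ((c0 :: rest).foldl
        (fun d el => el.foldl (fun d kv => d.insert kv.1 (d.getD kv.1 0 + 1)) d)
        PySem.Dict.empty)
      = PySem.Dict.counter ((c0 :: rest).flatMap (fun el => el.map Prod.fst)) := by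
    rw [← PySem.Dict.foldl_insert_getD_add_one_eq_counter, List.foldl_flatMap]
    congr 1
    funext d el
    simp [List.foldl_map]
  rw [hcounts, PySem.Dict.items_counter, List.filter_map, List.map_map]
  set K0 : List String := c0.map Prod.fst with hK0
  set Kr : List String := rest.flatMap (fun el => el.map Prod.fst) with hKr
  have hflat : (c0 :: rest).flatMap (fun el => el.map Prod.fst) = K0 ++ Kr := by
    simp [hK0, hKr]
  rw [hflat]
  -- identify the two key lists
  have hndc0 : K0.Nodup := hnd c0 (by simp)
  have hndr : ∀ el ∈ rest, (el.map Prod.fst).Nodup := fun el hel => hnd el (by simp [hel])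
  have hofK0 : PySem.Set.ofList K0 = K0 := PySem.Set.ofList_eq_self_of_nodup K0 hndc0
  have hsplit : ∃ u, PySem.Set.ofList (K0 ++ Kr) = K0 ++ u ∧ ∀ y ∈ u, y ∉ K0 := by
    rw [PySem.Set.ofList_eq_foldl, List.foldl_append, ← PySem.Set.ofList_eq_foldl, hofK0]
    exact pv_foldl_add_split Kr K0
  obtain ⟨u, hu, humem⟩ := hsplit
  have hn : ((c0 :: rest).length : Int) = 1 + rest.length := by simp; omega
  have hkeys :
      (PySem.Set.ofList (K0 ++ Kr)).filter
          (fun k => (((K0 ++ Kr).count k : Int) == ((c0 :: rest).length : Int)))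
        = (PySem.Set.ofList K0).filter (fun k => decide (∀ el ∈ rest, k ∈ el.map Prod.fst)) := by
    rw [hu, hofK0, List.filter_append]
    have hu0 : u.filter (fun k => (((K0 ++ Kr).count k : Int) == ((c0 :: rest).length : Int))) = [] := by
      rw [List.filter_eq_nil_iff]
      intro y hy
      have h0 : K0.count y = 0 := List.count_eq_zero.mpr (humem y hy)
      have hle := pv_count_le y rest hndr
      rw [← hKr] at hle
      simp only [List.count_append, h0, Nat.zero_add, hn, beq_iff_eq]
      intro hc
      have : Kr.count y = 1 + rest.length := by exact_mod_cast hc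
      omega
    rw [hu0, List.append_nil]
    apply List.filter_congr
    intro k hk
    have h1 : K0.count k = 1 := List.count_eq_one_of_mem hndc0 hk
    have hiff := pv_count_eq_iff k rest hndr
    rw [← hKr] at hiff
    simp only [List.count_append, h1, hn]
    rw [Bool.eq_iff_iff]
    simp only [beq_iff_eq, decide_eq_true_eq]
    rw [← hiff]
    omega
  rw [pv_foldl_inter]
  simp only [Function.comp_def]
  rw [hkeys]
  simp
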